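-- pv_equiv track=rewrite | github.com/TencentBlueKing/bk-monitor | bkmonitor/packages/monitor_web/incident/resources.py | generate_time_range_from_alerts
-- ===== SOURCE A (Python) =====
-- def generate_time_range_from_alerts(alert_ids: list[int]) -> tuple[int, int]:
--     start_time, end_time = None, None
--     for alert_id in alert_ids:
--         timestamp = int(str(alert_id)[:10])
--         if start_time is None or timestamp < start_time:
--             start_time = timestamp
--         if end_time is None or timestamp > end_time:
--             end_time = timestamp
--
--     return start_time, end_time
-- ===== SOURCE B (Python) =====
-- def generate_time_range_from_alerts(alert_ids: list[int]) -> tuple[int, int]: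
--     if not alert_ids:
--         return None, None
--     ts = sorted(int(str(alert_id)[:10]) for alert_id in alert_ids)
--     return ts[0], ts[-1]
-- ===== Notes on version B (the rewrite author's own statement) =====
-- stated objective: alternative
-- what changed: B sorts the truncated timestamps once and reads the extremes off the ends of the sorted list (ts[0], ts[-1]), instead of A's single scan maintaining running min/max through None sentinels; it trades A's O(n) scan for an O(n log n) sort.
-- outside the precondition, e.g. on generate_time_range_from_alerts([]): A returns (None, None), B returns (None, None)
import Mathlib
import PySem

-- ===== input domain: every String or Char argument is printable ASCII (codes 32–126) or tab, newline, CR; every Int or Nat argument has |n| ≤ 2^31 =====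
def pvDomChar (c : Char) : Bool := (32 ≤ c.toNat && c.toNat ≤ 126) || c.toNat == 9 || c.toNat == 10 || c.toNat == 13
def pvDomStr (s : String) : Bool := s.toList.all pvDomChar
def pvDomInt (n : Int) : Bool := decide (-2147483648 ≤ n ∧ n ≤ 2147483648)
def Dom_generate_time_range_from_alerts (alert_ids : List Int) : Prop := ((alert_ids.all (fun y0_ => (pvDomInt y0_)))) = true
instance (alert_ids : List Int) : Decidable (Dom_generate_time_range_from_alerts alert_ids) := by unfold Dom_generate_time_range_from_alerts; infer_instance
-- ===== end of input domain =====

-- B replaces A's single scan maintaining running min/max through None sentinels by a sort of the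
-- truncated timestamps followed by reading the two ends of the sorted list: a different algorithm
-- of the same small cost, chosen for clarity.

-- ===== PORT A =====
-- timestamp = int(str(alert_id)[:10]); on the admitted domain the truncated string always
-- parses, so the .getD 0 default is never the returned value.
def pvTs (a : Int) : Int :=
  (PySem.Int.ofStr? (PySem.Str.slice (PySem.Int.toStr a) none (some 10))).getD 0

def pvStepA (st : Option Int × Option Int) (a : Int) : Option Int × Option Int :=
  let t := pvTs a
  ((match st.1 with
    | none => some t
    | some s => if t < s then some t else some s),
   (match st.2 with
    | none => some t
    | some e => if t > e then some t else some e))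

-- on the empty list A returns (None, None), not an Int pair: excluded by Pre_, the .getD 0 is never hit
def generate_time_range_from_alerts (alert_ids : List Int) : Int × Int :=
  let st := alert_ids.foldl pvStepA (none, none)
  (st.1.getD 0, st.2.getD 0)

-- ===== PORT B =====
-- Python B returns (None, None) on []; excluded by Pre_, the placeholder (0, 0) / .getD 0 is never hit
def generate_time_range_from_alerts_alt (alert_ids : List Int) : Int × Int :=
  match alert_ids with
  | [] => (0, 0)
  | _ =>
    let ts := PySem.List.sorted (alert_ids.map pvTs) (fun x => x) false
    ((PySem.List.pyGet? ts 0).getD 0, (PySem.List.pyGet? ts (-1)).getD 0)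

-- ===== PRECONDITION & SPEC =====
-- Pre_ excludes only the empty list, on which both Pythons return (None, None) — not a value of the declared tuple[int, int] type.
def Pre_generate_time_range_from_alerts (alert_ids : List Int) : Prop := alert_ids ≠ []
instance (alert_ids : List Int) : Decidable (Pre_generate_time_range_from_alerts alert_ids) := by
  unfold Pre_generate_time_range_from_alerts; infer_instance

def pvWitness_generate_time_range_from_alerts : List Int := [1700000000, -5]

def Spec_generate_time_range_from_alerts (alert_ids : List Int) (out : Int × Int) : Prop := out = generate_time_range_from_alerts_alt alert_ids
instance (alert_ids : List Int) (out : Int × Int) : Decidable (Spec_generate_time_range_from_alerts alert_ids out) := by unfold Spec_generate_time_range_from_alerts; infer_instance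

-- ===== CLAIM (what is proved, stated in full; the proofs are below) =====
def Claim_equal_generate_time_range_from_alerts : Prop := ∀ (alert_ids : List Int), Dom_generate_time_range_from_alerts alert_ids → Pre_generate_time_range_from_alerts alert_ids → Spec_generate_time_range_from_alerts alert_ids (generate_time_range_from_alerts alert_ids)

-- ===== LEMMAS AND PROOFS =====

-- A's loop, once both extremes are set, is the running min/max fold over the mapped timestamps.
theorem pv_foldA_some (t : List Int) (s e : Int) :
    t.foldl pvStepA (some s, some e)
      = (some ((t.map pvTs).foldl min s), some ((t.map pvTs).foldl max e)) := by
  induction t generalizing s e with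
  | nil => simp
  | cons a t ih =>
    simp only [List.foldl_cons, List.map_cons]
    rw [show pvStepA (some s, some e) a
          = (some (min s (pvTs a)), some (max e (pvTs a))) by
        simp only [pvStepA]
        refine Prod.ext ?_ ?_ <;> simp only [] <;> split <;> simp <;> omega]
    exact ih _ _

-- the running-min fold is a member of a :: t and a lower bound of it
theorem pv_foldl_min_spec (t : List Int) (a : Int) :
    t.foldl min a ∈ a :: t ∧ ∀ y ∈ a :: t, t.foldl min a ≤ y := by
  induction t generalizing a with
  | nil => simp
  | cons b t ih =>
    obtain ⟨hmem, hle⟩ := ih (min a b)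
    constructor
    · rw [List.foldl_cons]
      rcases List.mem_cons.mp hmem with h | h
      · rw [h]
        rcases le_total a b with hab | hab
        · rw [min_eq_left hab]; exact List.mem_cons_self
        · rw [min_eq_right hab]; exact List.mem_cons_of_mem _ List.mem_cons_self
      · exact List.mem_cons_of_mem _ (List.mem_cons_of_mem _ h)
    · intro y hy
      rcases List.mem_cons.mp hy with h | hy
      · subst h
        exact le_trans (hle _ (List.mem_cons_self)) (min_le_left _ _)
      rcases List.mem_cons.mp hy with h | hy
      · subst h
        exact le_trans (hle _ (List.mem_cons_self)) (min_le_right _ _)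
      · exact hle _ (List.mem_cons_of_mem _ hy)

theorem pv_foldl_max_spec (t : List Int) (a : Int) :
    t.foldl max a ∈ a :: t ∧ ∀ y ∈ a :: t, y ≤ t.foldl max a := by
  induction t generalizing a with
  | nil => simp
  | cons b t ih =>
    obtain ⟨hmem, hle⟩ := ih (max a b)
    constructor
    · rw [List.foldl_cons]
      rcases List.mem_cons.mp hmem with h | h
      · rw [h]
        rcases le_total a b with hab | hab
        · rw [max_eq_right hab]; exact List.mem_cons_of_mem _ List.mem_cons_self
        · rw [max_eq_left hab]; exact List.mem_cons_self
      · exact List.mem_cons_of_mem _ (List.mem_cons_of_mem _ h)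
    · intro y hy
      rcases List.mem_cons.mp hy with h | hy
      · subst h
        exact le_trans (le_max_left _ _) (hle _ (List.mem_cons_self))
      rcases List.mem_cons.mp hy with h | hy
      · subst h
        exact le_trans (le_max_right _ _) (hle _ (List.mem_cons_self))
      · exact hle _ (List.mem_cons_of_mem _ hy)

-- the last element of a ≤-sorted nonempty list is an upper bound of it
theorem pv_pairwise_getLast_ge (l : List Int) (h : l.Pairwise (· ≤ ·)) (hne : l ≠ []) :
    ∀ y ∈ l, y ≤ l.getLast hne := by
  induction l with
  | nil => simp at hne
  | cons a t ih =>
    intro y hy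
    match t, hne with
    | [], _ => simp at hy; simp [hy, List.getLast]
    | b :: t', _ =>
      rw [List.getLast_cons (by simp)]
      rcases List.mem_cons.mp hy with h1 | h1
      · subst h1
        have hab : y ≤ b := (List.pairwise_cons.mp h).1 b List.mem_cons_self
        exact le_trans hab (ih (List.pairwise_cons.mp h).2 (by simp) b List.mem_cons_self)
      · exact ih (List.pairwise_cons.mp h).2 (by simp) y h1

theorem generate_time_range_from_alerts_eq (x : Int) (t : List Int) :
    generate_time_range_from_alerts (x :: t) = generate_time_range_from_alerts_alt (x :: t) := by
  simp only [generate_time_range_from_alerts, generate_time_range_from_alerts_alt,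
    List.foldl_cons]
  rw [show pvStepA (none, none) x = (some (pvTs x), some (pvTs x)) by simp [pvStepA]]
  rw [pv_foldA_some]
  set ts := (x :: t).map pvTs with hts
  have htsne : ts ≠ [] := by simp [hts]
  set srt := PySem.List.sorted ts (fun x => x) false with hsrt
  have hsne : srt ≠ [] := by
    simpa [hsrt, PySem.List.sorted_eq_nil_iff] using htsne
  have hperm : srt.Perm ts := PySem.List.sorted_perm ts (fun x => x) false
  have hpw : srt.Pairwise (fun a b => a ≤ b) := by
    simpa using PySem.List.sorted_pairwise ts (fun x => x)
  -- head of sorted = fold min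
  obtain ⟨hd, tl, hcons⟩ := List.exists_cons_of_ne_nil hsne
  have hget0 : PySem.List.pyGet? srt 0 = some hd := by
    rw [hcons]; exact PySem.List.pyGet?_zero_cons _ _
  have hgetlast : PySem.List.pyGet? srt (-1) = some (srt.getLast hsne) := by
    rw [PySem.List.pyGet?_neg_one, List.getLast?_eq_some_getLast hsne]
  have hhd_le : ∀ y ∈ ts, hd ≤ y := by
    have := PySem.List.key_head_sorted_le (xs := ts) (key := fun x => x) (hsrt.symm.trans hcons)
    simpa using this
  have hhd_mem : hd ∈ ts := hperm.mem_iff.mp (by rw [hcons]; exact List.mem_cons_self)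
  have hlast_mem : srt.getLast hsne ∈ ts := hperm.mem_iff.mp (List.getLast_mem hsne)
  have hlast_ge : ∀ y ∈ ts, y ≤ srt.getLast hsne := by
    intro y hy
    exact pv_pairwise_getLast_ge srt hpw hsne y (hperm.mem_iff.mpr hy)
  obtain ⟨hminmem, hminle⟩ := pv_foldl_min_spec (t.map pvTs) (pvTs x)
  obtain ⟨hmaxmem, hmaxle⟩ := pv_foldl_max_spec (t.map pvTs) (pvTs x)
  have hts_eq : ts = pvTs x :: t.map pvTs := by simp [hts]
  rw [hget0, hgetlast]
  simp only [Option.getD_some]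
  refine Prod.ext ?_ ?_
  · show (t.map pvTs).foldl min (pvTs x) = hd
    exact le_antisymm (hminle _ (hts_eq ▸ hhd_mem)) (hhd_le _ (hts_eq.symm ▸ hminmem))
  · show (t.map pvTs).foldl max (pvTs x) = srt.getLast hsne
    exact le_antisymm (hlast_ge _ (hts_eq.symm ▸ hmaxmem)) (hmaxle _ (hts_eq ▸ hlast_mem))

-- ===== VERDICT (by name: the statement is the Claim_ definition above) =====
theorem generate_time_range_from_alerts_spec : Claim_equal_generate_time_range_from_alerts := by
  intro alert_ids _ hpre
  match alert_ids with
  | [] => exact absurd rfl hpre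
  | x :: t => exact generate_time_range_from_alerts_eq x t
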